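-- pv_equiv track=rewrite | github.com/RHUDHRESH/Raptorflow | unlimited_backend.py | filter_sensitive_content
-- ===== SOURCE A (Python) =====
-- def filter_sensitive_content(content: str) -> str:
--     sensitive_patterns = [
--         "api key",
--         "secret",
--         "password",
--         "token",
--         "database",
--         "schema",
--         "table",
--         "configuration",
--         "system architecture",
--         "component",
--         "config",
--     ]
--
--     content_lower = content.lower()
--     for pattern in sensitive_patterns:
--         if pattern in content_lower:
--             return "I cannot provide that information."
--
--     return content
-- ===== SOURCE B (Python) =====
-- _SENSITIVE = (
--     "api key", "secret", "password", "token", "database", "schema",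
--     "table", "configuration", "system architecture", "component", "config",
-- )
--
-- def filter_sensitive_content(content: str) -> str:
--     s = content.lower()
--     for i in range(len(s) + 1):
--         if s.startswith(_SENSITIVE, i):
--             return "I cannot provide that information."
--     return content
-- ===== Notes on version B (the rewrite author's own statement) =====
-- stated objective: alternative
-- what changed: Replaces eleven separate substring scans (one per pattern) by a single left-to-right pass over the lowered string that tests all patterns at each position with str.startswith on a tuple.
import Mathlib
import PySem

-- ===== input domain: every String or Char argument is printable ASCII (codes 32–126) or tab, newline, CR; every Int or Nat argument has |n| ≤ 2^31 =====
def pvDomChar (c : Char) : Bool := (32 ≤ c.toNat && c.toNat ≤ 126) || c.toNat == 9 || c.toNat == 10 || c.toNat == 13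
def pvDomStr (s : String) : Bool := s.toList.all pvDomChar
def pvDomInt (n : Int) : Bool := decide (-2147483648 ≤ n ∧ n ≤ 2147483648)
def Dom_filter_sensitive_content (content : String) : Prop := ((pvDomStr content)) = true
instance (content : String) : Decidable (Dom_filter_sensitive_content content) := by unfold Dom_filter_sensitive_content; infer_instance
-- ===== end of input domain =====

-- B replaces A's eleven separate substring scans by one left-to-right positional scan
-- testing all patterns at each position (objective: alternative; return value only, no side effects).

-- ===== PORT A =====
def pvPatternsA : List String :=
  ["api key", "secret", "password", "token", "database", "schema",
   "table", "configuration", "system architecture", "component", "config"]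

-- the 'for pattern in sensitive_patterns: if pattern in content_lower: return …' loop
def pvLoopA (pats : List String) (contentLower : String) (content : String) : String :=
  match pats with
  | [] => content
  | p :: rest =>
      if PySem.Str.isIn p contentLower then "I cannot provide that information."
      else pvLoopA rest contentLower content

def filter_sensitive_content (content : String) : String :=
  pvLoopA pvPatternsA (PySem.Str.lower content) content

-- ===== PORT B =====
def pvPatternsB : List (List Char) :=
  ["api key".toList, "secret".toList, "password".toList, "token".toList, "database".toList,
   "schema".toList, "table".toList, "configuration".toList, "system architecture".toList,
   "component".toList, "config".toList]

-- single pass: 'for i in range(len(s)+1): if s.startswith(_SENSITIVE, i)'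
def pvScanB (pats : List (List Char)) : List Char → Bool
  | [] => pats.any (fun p => p.isPrefixOf ([] : List Char))
  | c :: rest => pats.any (fun p => p.isPrefixOf (c :: rest)) || pvScanB pats rest

def filter_sensitive_content_alt (content : String) : String :=
  if pvScanB pvPatternsB (PySem.Chars.lower content.toList) then
    "I cannot provide that information."
  else content

-- ===== PRECONDITION & SPEC =====
def Spec_filter_sensitive_content (content : String) (out : String) : Prop := out = filter_sensitive_content_alt content
instance (content : String) (out : String) : Decidable (Spec_filter_sensitive_content content out) := by unfold Spec_filter_sensitive_content; infer_instance

-- ===== CLAIM (what is proved, stated in full; the proofs are below) =====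
def Claim_equal_filter_sensitive_content : Prop := ∀ (content : String), Dom_filter_sensitive_content content → Spec_filter_sensitive_content content (filter_sensitive_content content)

-- ===== LEMMAS AND PROOFS =====

-- A's loop returns the canned reply iff some pattern is a substring of the lowered content
lemma pvLoopA_eq (pats : List String) (cl content : String) :
    pvLoopA pats cl content =
      if pats.any (fun p => PySem.Str.isIn p cl) then "I cannot provide that information."
      else content := by
  induction pats with
  | nil => simp [pvLoopA]
  | cons p rest ih =>
      rw [pvLoopA, ih]
      by_cases h : PySem.Chars.isIn p.toList cl.toList = true
      · simp [PySem.Str.isIn_eq, h]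
      · simp [PySem.Str.isIn_eq, h]

-- B's positional scan succeeds iff some pattern is a prefix of some suffix
lemma pvScanB_iff (pats : List (List Char)) (cs : List Char) :
    pvScanB pats cs = true ↔ ∃ p ∈ pats, ∃ j, p <+: cs.drop j := by
  induction cs with
  | nil =>
      simp only [pvScanB, List.any_eq_true, List.drop_nil]
      constructor
      · rintro ⟨p, hp, hpre⟩; exact ⟨p, hp, 0, List.isPrefixOf_iff_prefix.mp hpre⟩
      · rintro ⟨p, hp, _, hpre⟩; exact ⟨p, hp, List.isPrefixOf_iff_prefix.mpr hpre⟩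
  | cons c rest ih =>
      simp only [pvScanB, Bool.or_eq_true, List.any_eq_true, ih]
      constructor
      · rintro (⟨p, hp, hpre⟩ | ⟨p, hp, j, hpre⟩)
        · exact ⟨p, hp, 0, by simpa using List.isPrefixOf_iff_prefix.mp hpre⟩
        · exact ⟨p, hp, j + 1, by simpa using hpre⟩
      · rintro ⟨p, hp, j, hpre⟩
        cases j with
        | zero => exact Or.inl ⟨p, hp, List.isPrefixOf_iff_prefix.mpr (by simpa using hpre)⟩
        | succ j => exact Or.inr ⟨p, hp, j, by simpa using hpre⟩

-- per-string correspondence between the two pattern tables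
lemma pvPatterns_map : pvPatternsB = pvPatternsA.map String.toList := by
  simp [pvPatternsA, pvPatternsB]

lemma pvScanB_eq_anyIsIn (cl : List Char) :
    pvScanB pvPatternsB cl = pvPatternsA.any (fun p => PySem.Chars.isIn p.toList cl) := by
  rcases h : pvPatternsA.any (fun p => PySem.Chars.isIn p.toList cl) with _ | _
  · rw [Bool.eq_false_iff]
    intro hscan
    rcases (pvScanB_iff _ _).mp hscan with ⟨p, hp, hj⟩
    rw [pvPatterns_map, List.mem_map] at hp
    rcases hp with ⟨q, hq, rfl⟩
    have : PySem.Chars.isIn q.toList cl = true :=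
      (PySem.Chars.exists_prefix_drop_iff_isIn _ _).mp hj
    rw [List.any_eq_false] at h
    exact absurd this (by simpa using h q hq)
  · rw [List.any_eq_true] at h
    rcases h with ⟨q, hq, hin⟩
    apply (pvScanB_iff _ _).mpr
    refine ⟨q.toList, ?_, (PySem.Chars.exists_prefix_drop_iff_isIn _ _).mpr hin⟩
    rw [pvPatterns_map, List.mem_map]; exact ⟨q, hq, rfl⟩

-- ===== VERDICT (by name: the statement is the Claim_ definition above) =====
theorem filter_sensitive_content_spec : Claim_equal_filter_sensitive_content := by
  intro content _
  unfold Spec_filter_sensitive_content filter_sensitive_content filter_sensitive_content_alt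
  rw [pvLoopA_eq, pvScanB_eq_anyIsIn]
  have : ∀ p : String, PySem.Str.isIn p (PySem.Str.lower content) =
      PySem.Chars.isIn p.toList (PySem.Chars.lower content.toList) := by
    intro p; simp [PySem.Str.isIn_eq, PySem.Str.toList_lower]
  simp only [this]
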